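-- pv_equiv track=rewrite | github.com/arin17bishwa/myCP_sols | CC/POSPREFS.py | func
-- ===== SOURCE A (Python) =====
-- def func(n, k):
--     arr = [(i + 1) * (pow(-1, i % 2)) for i in range(n)]
--     neg = n >> 1
--     q = n - k
--     i = n - 1
--     if neg < q:
--         while i > -1 and neg != q:
--             if arr[i] > 0:
--                 arr[i] = -arr[i]
--                 neg += 1
--             i -= 1
--     elif neg > q:
--         while i > -1 and neg != q:
--             if arr[i] < 0:
--                 arr[i] = -arr[i]
--                 neg -= 1
--             i -= 1
--
--     return ' '.join(map(str, arr))
-- ===== SOURCE B (Python) =====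
-- def func(n, k):
--     neg = n >> 1
--     q = n - k
--     if neg < q:
--         need = min(q - neg, (n + 1) >> 1)
--         cut = 2 * (((n + 1) >> 1) - need)
--         def val(i):
--             if i % 2 == 0:
--                 return -(i + 1) if i >= cut else i + 1
--             return -(i + 1)
--     elif neg > q:
--         need = min(neg - q, n >> 1)
--         cut = 2 * ((n >> 1) - need) + 1
--         def val(i):
--             if i % 2 == 1:
--                 return (i + 1) if i >= cut else -(i + 1)
--             return i + 1
--     else:
--         def val(i):
--             return -(i + 1) if i % 2 else i + 1
--     return ' '.join(str(val(i)) for i in range(n))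
-- ===== Notes on version B (the rewrite author's own statement) =====
-- stated objective: alternative
-- what changed: Replaces A's build-array-then-backward-while-mutation with a closed-form computation: the number of flips and an arithmetic parity cutoff index are derived directly from n and k, and the output is produced in one comprehension with no mutation or scan.
import Mathlib
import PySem

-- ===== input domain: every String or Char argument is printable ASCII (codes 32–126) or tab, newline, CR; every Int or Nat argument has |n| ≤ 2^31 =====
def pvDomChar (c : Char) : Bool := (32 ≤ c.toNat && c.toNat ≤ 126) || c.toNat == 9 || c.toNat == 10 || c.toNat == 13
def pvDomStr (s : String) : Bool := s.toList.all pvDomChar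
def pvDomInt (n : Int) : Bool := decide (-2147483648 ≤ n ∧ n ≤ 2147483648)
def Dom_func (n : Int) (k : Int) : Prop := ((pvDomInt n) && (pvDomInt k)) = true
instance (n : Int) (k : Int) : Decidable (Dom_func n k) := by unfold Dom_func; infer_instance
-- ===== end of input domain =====

-- B replaces A's build-then-backward-while-scan by a closed-form parity/cutoff formula and a
-- single comprehension (different decomposition, same output; not claimed faster).

-- ===== PORT A =====
-- the `while i > -1 …` loop for the `neg < q` case; fuel m plays the role of i+1 (exact: i runs n-1 … -1)
def funcLoopLt : List Int → Int → Int → Nat → List Int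
  | arr, _, _, 0 => arr
  | arr, neg, q, m+1 =>
    if neg ≠ q then
      let v := PySem.List.pyGetD arr (m : Int) 0
      if v > 0 then funcLoopLt (PySem.List.pySetD arr (m : Int) (-v)) (neg + 1) q m
      else funcLoopLt arr neg q m
    else arr

-- the `while i > -1 …` loop for the `neg > q` case
def funcLoopGt : List Int → Int → Int → Nat → List Int
  | arr, _, _, 0 => arr
  | arr, neg, q, m+1 =>
    if neg ≠ q then
      let v := PySem.List.pyGetD arr (m : Int) 0
      if v < 0 then funcLoopGt (PySem.List.pySetD arr (m : Int) (-v)) (neg - 1) q m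
      else funcLoopGt arr neg q m
    else arr

def func (n : Int) (k : Int) : String :=
  let arr := (PySem.List.pyRange 0 n 1).map (fun i => (i + 1) * (-1) ^ (PySem.Int.mod i 2).toNat)
  let neg := n >>> (1 : Nat)        -- Python n >> 1 is Lean's >>> on Int (floors)
  let q := n - k
  let arr2 :=
    if neg < q then funcLoopLt arr neg q n.toNat
    else if neg > q then funcLoopGt arr neg q n.toNat
    else arr
  PySem.Str.join " " (arr2.map PySem.Int.toStr)

-- ===== PORT B =====
def func_alt (n : Int) (k : Int) : String :=
  let neg := n >>> (1 : Nat)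
  let q := n - k
  let val : Int → Int :=
    if neg < q then
      let need := min (q - neg) ((n + 1) >>> (1 : Nat))
      let cut := 2 * ((n + 1) >>> (1 : Nat) - need)
      fun i => if PySem.Int.mod i 2 = 0 then (if cut ≤ i then -(i + 1) else i + 1) else -(i + 1)
    else if neg > q then
      let need := min (neg - q) (n >>> (1 : Nat))
      let cut := 2 * (n >>> (1 : Nat) - need) + 1
      fun i => if PySem.Int.mod i 2 = 1 then (if cut ≤ i then i + 1 else -(i + 1)) else i + 1
    else
      fun i => if PySem.Int.mod i 2 ≠ 0 then -(i + 1) else i + 1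
  PySem.Str.join " " ((PySem.List.pyRange 0 n 1).map (fun i => PySem.Int.toStr (val i)))

-- ===== PRECONDITION & SPEC =====
def Spec_func (n : Int) (k : Int) (out : String) : Prop := out = func_alt n k
instance (n : Int) (k : Int) (out : String) : Decidable (Spec_func n k out) := by unfold Spec_func; infer_instance

-- ===== CLAIM (what is proved, stated in full; the proofs are below) =====
def Claim_equal_func : Prop := ∀ (n : Int) (k : Int), Dom_func n k → Spec_func n k (func n k)

-- ===== LEMMAS AND PROOFS =====

-- the base alternating value at index j (what A's comprehension puts at position j)
def pvBase (j : Nat) : Int := if j % 2 = 0 then (j : Int) + 1 else -((j : Int) + 1)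

lemma pvBase_eq_sign (j : Nat) :
    ((j : Int) + 1) * (-1) ^ (PySem.Int.mod (j : Int) 2).toNat = pvBase j := by
  have h2 : PySem.Int.mod (j : Int) 2 = ((j % 2 : Nat) : Int) := by
    exact_mod_cast PySem.Int.mod_natCast j 2
  rw [h2]
  rcases Nat.mod_two_eq_zero_or_one j with h | h <;> simp [pvBase, h]

lemma funcLoopLt_length (m : Nat) : ∀ (arr : List Int) (neg q : Int),
    (funcLoopLt arr neg q m).length = arr.length := by
  induction m with
  | zero => intro arr neg q; rfl
  | succ m ih =>
    intro arr neg q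
    simp only [funcLoopLt]
    split_ifs <;> simp [ih]

lemma funcLoopGt_length (m : Nat) : ∀ (arr : List Int) (neg q : Int),
    (funcLoopGt arr neg q m).length = arr.length := by
  induction m with
  | zero => intro arr neg q; rfl
  | succ m ih =>
    intro arr neg q
    simp only [funcLoopGt]
    split_ifs <;> simp [ih]

-- characterisation of A's first while loop: it flips exactly the highest q-neg even-indexed
-- (positive) entries below m, i.e. the even j with 2*((m+1)/2) - 2*(q-neg) ≤ j
lemma funcLoopLt_getD (m : Nat) : ∀ (arr : List Int) (neg q : Int),
    neg ≤ q → m ≤ arr.length → (∀ j, j < m → arr.getD j 0 = pvBase j) →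
    ∀ j : Nat, (funcLoopLt arr neg q m).getD j 0 =
      if j < m ∧ j % 2 = 0 ∧ 2 * (((m + 1) / 2 : Nat) : Int) - 2 * (q - neg) ≤ (j : Int)
      then -((j : Int) + 1) else arr.getD j 0 := by
  induction m with
  | zero =>
    intro arr neg q _ _ _ j
    simp [funcLoopLt]
  | succ m ih =>
    intro arr neg q hle hlen hpr j
    have hm : m < arr.length := by omega
    have hvm : arr.getD m 0 = pvBase m := hpr m (by omega)
    simp only [funcLoopLt]
    by_cases hne : neg ≠ q
    · have hlt : neg < q := lt_of_le_of_ne hle (by simpa using hne)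
      simp only [if_pos hne]
      rcases Nat.mod_two_eq_zero_or_one m with hpar | hpar
      · -- m even: arr[m] = m+1 > 0, flipped
        have hv : PySem.List.pyGetD arr (m : Int) 0 = (m : Int) + 1 := by
          rw [PySem.List.pyGetD_natCast, hvm]; simp [pvBase, hpar]; try omega
        rw [hv, if_pos (by omega)]
        rw [PySem.List.pySetD_natCast]
        have hpr' : ∀ i, i < m → (arr.set m (-((m:Int)+1))).getD i 0 = pvBase i := by
          intro i hi
          rw [List.getD_eq_getElem?_getD, List.getElem?_set_ne (by omega)]
          rw [← List.getD_eq_getElem?_getD]; exact hpr i (by omega)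
        rw [ih (arr.set m (-((m:Int)+1))) (neg + 1) q (by omega) (by simpa using (by omega : m ≤ arr.length)) hpr' j]
        by_cases hjm : j = m
        · subst hjm
          rw [if_neg (by omega)]
          rw [List.getD_eq_getElem?_getD, List.getElem?_set_self hm]
          have : (j : Int) ≥ 2 * (((j + 1 + 1) / 2 : Nat) : Int) - 2 * (q - neg) := by
            rw [ge_iff_le]; push_cast; omega
          rw [if_pos ⟨by omega, hpar, by omega⟩]
          simp
        · by_cases hjlt : j < m
          · have hset : (arr.set m (-((m:Int)+1))).getD j 0 = arr.getD j 0 := by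
              rw [List.getD_eq_getElem?_getD, List.getElem?_set_ne (by omega),
                ← List.getD_eq_getElem?_getD]
            rw [hset]
            have hcond : (j < m ∧ j % 2 = 0 ∧ 2 * (((m + 1) / 2 : Nat) : Int) - 2 * (q - (neg + 1)) ≤ (j : Int))
                ↔ (j < m + 1 ∧ j % 2 = 0 ∧ 2 * (((m + 1 + 1) / 2 : Nat) : Int) - 2 * (q - neg) ≤ (j : Int)) := by
              constructor
              · rintro ⟨h1, h2, h3⟩; exact ⟨by omega, h2, by push_cast at h3 ⊢; omega⟩
              · rintro ⟨h1, h2, h3⟩; exact ⟨by omega, h2, by push_cast at h3 ⊢; omega⟩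
            split_ifs with h1 h2 h2
            · rfl
            · exact absurd (hcond.mp h1) h2
            · exact absurd (hcond.mpr h2) h1
            · rfl
          · -- j > m
            rw [if_neg (by omega), if_neg (by omega)]
            rw [List.getD_eq_getElem?_getD, List.getElem?_set_ne (by omega),
              ← List.getD_eq_getElem?_getD]
      · -- m odd: arr[m] = -(m+1) < 0, not flipped
        have hv : PySem.List.pyGetD arr (m : Int) 0 = -((m : Int) + 1) := by
          rw [PySem.List.pyGetD_natCast, hvm]; simp [pvBase, hpar]; try omega
        rw [hv, if_neg (by omega)]
        rw [ih arr neg q hle (by omega) (fun i hi => hpr i (by omega)) j]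
        have hcond : (j < m ∧ j % 2 = 0 ∧ 2 * (((m + 1) / 2 : Nat) : Int) - 2 * (q - neg) ≤ (j : Int))
            ↔ (j < m + 1 ∧ j % 2 = 0 ∧ 2 * (((m + 1 + 1) / 2 : Nat) : Int) - 2 * (q - neg) ≤ (j : Int)) := by
          constructor
          · rintro ⟨h1, h2, h3⟩; exact ⟨by omega, h2, by push_cast at h3 ⊢; omega⟩
          · rintro ⟨h1, h2, h3⟩
            refine ⟨by omega, h2, by push_cast at h3 ⊢; omega⟩
        split_ifs with h1 h2 h2
        · rfl
        · exact absurd (hcond.mp h1) h2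
        · exact absurd (hcond.mpr h2) h1
        · rfl
    · -- neg = q: loop stops; no index satisfies the flip condition
      simp only [if_neg hne]
      rw [not_not] at hne; subst hne
      rw [if_neg]
      rintro ⟨h1, h2, h3⟩
      push_cast at h3; omega

-- characterisation of A's second while loop: it flips exactly the highest neg-q odd-indexed
-- (negative) entries below m, i.e. the odd j with 2*(m/2) - 2*(neg-q) + 1 ≤ j
lemma funcLoopGt_getD (m : Nat) : ∀ (arr : List Int) (neg q : Int),
    q ≤ neg → m ≤ arr.length → (∀ j, j < m → arr.getD j 0 = pvBase j) →
    ∀ j : Nat, (funcLoopGt arr neg q m).getD j 0 =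
      if j < m ∧ j % 2 = 1 ∧ 2 * ((m / 2 : Nat) : Int) - 2 * (neg - q) + 1 ≤ (j : Int)
      then (j : Int) + 1 else arr.getD j 0 := by
  induction m with
  | zero =>
    intro arr neg q _ _ _ j
    simp [funcLoopGt]
  | succ m ih =>
    intro arr neg q hle hlen hpr j
    have hm : m < arr.length := by omega
    have hvm : arr.getD m 0 = pvBase m := hpr m (by omega)
    simp only [funcLoopGt]
    by_cases hne : neg ≠ q
    · have hlt : q < neg := lt_of_le_of_ne hle (by simpa using (Ne.symm hne))
      simp only [if_pos hne]
      rcases Nat.mod_two_eq_zero_or_one m with hpar | hpar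
      · -- m even: arr[m] = m+1 > 0, not flipped
        have hv : PySem.List.pyGetD arr (m : Int) 0 = (m : Int) + 1 := by
          rw [PySem.List.pyGetD_natCast, hvm]; simp [pvBase, hpar]; try omega
        rw [hv, if_neg (by omega)]
        rw [ih arr neg q hle (by omega) (fun i hi => hpr i (by omega)) j]
        have hcond : (j < m ∧ j % 2 = 1 ∧ 2 * ((m / 2 : Nat) : Int) - 2 * (neg - q) + 1 ≤ (j : Int))
            ↔ (j < m + 1 ∧ j % 2 = 1 ∧ 2 * (((m + 1) / 2 : Nat) : Int) - 2 * (neg - q) + 1 ≤ (j : Int)) := by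
          constructor
          · rintro ⟨h1, h2, h3⟩; exact ⟨by omega, h2, by push_cast at h3 ⊢; omega⟩
          · rintro ⟨h1, h2, h3⟩; refine ⟨by omega, h2, by push_cast at h3 ⊢; omega⟩
        split_ifs with h1 h2 h2
        · rfl
        · exact absurd (hcond.mp h1) h2
        · exact absurd (hcond.mpr h2) h1
        · rfl
      · -- m odd: arr[m] = -(m+1) < 0, flipped
        have hv : PySem.List.pyGetD arr (m : Int) 0 = -((m : Int) + 1) := by
          rw [PySem.List.pyGetD_natCast, hvm]; simp [pvBase, hpar]; try omega
        rw [hv, if_pos (by omega)]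
        rw [PySem.List.pySetD_natCast]
        have hpr' : ∀ i, i < m → (arr.set m (-(-((m:Int)+1)))).getD i 0 = pvBase i := by
          intro i hi
          rw [List.getD_eq_getElem?_getD, List.getElem?_set_ne (by omega)]
          rw [← List.getD_eq_getElem?_getD]; exact hpr i (by omega)
        rw [ih (arr.set m (-(-((m:Int)+1)))) (neg - 1) q (by omega) (by simpa using (by omega : m ≤ arr.length)) hpr' j]
        by_cases hjm : j = m
        · subst hjm
          rw [if_neg (by omega)]
          rw [List.getD_eq_getElem?_getD, List.getElem?_set_self hm]
          rw [if_pos ⟨by omega, hpar, by push_cast; omega⟩]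
          simp
        · by_cases hjlt : j < m
          · have hset : (arr.set m (-(-((m:Int)+1)))).getD j 0 = arr.getD j 0 := by
              rw [List.getD_eq_getElem?_getD, List.getElem?_set_ne (by omega),
                ← List.getD_eq_getElem?_getD]
            rw [hset]
            have hcond : (j < m ∧ j % 2 = 1 ∧ 2 * ((m / 2 : Nat) : Int) - 2 * (neg - 1 - q) + 1 ≤ (j : Int))
                ↔ (j < m + 1 ∧ j % 2 = 1 ∧ 2 * (((m + 1) / 2 : Nat) : Int) - 2 * (neg - q) + 1 ≤ (j : Int)) := by
              constructor
              · rintro ⟨h1, h2, h3⟩; exact ⟨by omega, h2, by push_cast at h3 ⊢; omega⟩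
              · rintro ⟨h1, h2, h3⟩; exact ⟨by omega, h2, by push_cast at h3 ⊢; omega⟩
            split_ifs with h1 h2 h2
            · rfl
            · exact absurd (hcond.mp h1) h2
            · exact absurd (hcond.mpr h2) h1
            · rfl
          · rw [if_neg (by omega), if_neg (by omega)]
            rw [List.getD_eq_getElem?_getD, List.getElem?_set_ne (by omega),
              ← List.getD_eq_getElem?_getD]
    · simp only [if_neg hne]
      rw [not_not] at hne; subst hne
      rw [if_neg]
      rintro ⟨h1, h2, h3⟩
      push_cast at h3; omega

lemma shiftRight_one_eq (n : Int) : n >>> (1 : Nat) = n / 2 := by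
  rw [Int.shiftRight_eq_div_pow]; norm_num


lemma pyMod_two (j : Nat) : PySem.Int.mod (j : Int) 2 = ((j % 2 : Nat) : Int) := by
  exact_mod_cast PySem.Int.mod_natCast j 2

-- A's initial comprehension, as used by the proofs
def pvArr (n : Int) : List Int :=
  (PySem.List.pyRange 0 n 1).map (fun i => (i + 1) * (-1) ^ (PySem.Int.mod i 2).toNat)

lemma pvArr_length (n : Int) : (pvArr n).length = n.toNat := by
  simp [pvArr, PySem.List.length_pyRange_one]

lemma pvArr_getD (n : Int) (j : Nat) (hj : j < n.toNat) : (pvArr n).getD j 0 = pvBase j := by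
  have hn : n = ((n.toNat : Nat) : Int) := by omega
  rw [pvArr, List.getD_eq_getElem?_getD, hn,
    PySem.List.getElem?_map_pyRange_zero _ n.toNat j (by omega)]
  simpa using pvBase_eq_sign j

-- the `neg < q` branch: the loop result is B's comprehension
lemma pvLtBranch (n k : Int) (h1 : n >>> (1 : Nat) < n - k) :
    funcLoopLt (pvArr n) (n >>> (1 : Nat)) (n - k) n.toNat =
      (PySem.List.pyRange 0 n 1).map (fun i =>
        if PySem.Int.mod i 2 = 0 then
          (if 2 * ((n + 1) >>> (1 : Nat) - min (n - k - (n >>> (1 : Nat))) ((n + 1) >>> (1 : Nat))) ≤ i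
           then -(i + 1) else i + 1)
        else -(i + 1)) := by
  have hsh := shiftRight_one_eq
  apply List.ext_getElem
  · rw [funcLoopLt_length, pvArr_length]
    simp [PySem.List.length_pyRange_one]
  · intro i hA hB
    have hiN : i < n.toNat := by rw [funcLoopLt_length, pvArr_length] at hA; exact hA
    simp only [hsh] at h1 hA ⊢
    rw [← List.getD_eq_getElem _ 0 hA, List.getElem_map]
    rw [funcLoopLt_getD n.toNat (pvArr n) _ _ (le_of_lt h1) (le_of_eq (pvArr_length n).symm)
      (fun j hj => pvArr_getD n j hj) i]
    rw [PySem.List.getElem_pyRange_one, zero_add, pvArr_getD n i hiN, pyMod_two i]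
    rcases Nat.mod_two_eq_zero_or_one i with hp | hp
    · rw [if_pos (show ((i % 2 : Nat) : Int) = 0 by rw [hp]; rfl)]
      have hcnd : (i < n.toNat ∧ i % 2 = 0 ∧
            2 * (((n.toNat + 1) / 2 : Nat) : Int) - 2 * (n - k - n / 2) ≤ (i : Int))
          ↔ (2 * ((n + 1) / 2 - min (n - k - n / 2) ((n + 1) / 2)) ≤ (i : Int)) := by
        constructor
        · rintro ⟨-, -, h⟩; omega
        · intro h; exact ⟨hiN, hp, by omega⟩
      rw [if_congr hcnd rfl rfl]
      unfold pvBase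
      rw [if_pos hp]
    · rw [if_neg (show ¬ ((i % 2 : Nat) : Int) = 0 by rw [hp]; norm_num)]
      rw [if_neg (by rintro ⟨-, h2, -⟩; omega)]
      unfold pvBase
      rw [if_neg (by omega)]

-- the `neg > q` branch: the loop result is B's comprehension
lemma pvGtBranch (n k : Int) (h1 : n - k < n >>> (1 : Nat)) :
    funcLoopGt (pvArr n) (n >>> (1 : Nat)) (n - k) n.toNat =
      (PySem.List.pyRange 0 n 1).map (fun i =>
        if PySem.Int.mod i 2 = 1 then
          (if 2 * ((n >>> (1 : Nat)) - min ((n >>> (1 : Nat)) - (n - k)) (n >>> (1 : Nat))) + 1 ≤ i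
           then i + 1 else -(i + 1))
        else i + 1) := by
  have hsh := shiftRight_one_eq
  apply List.ext_getElem
  · rw [funcLoopGt_length, pvArr_length]
    simp [PySem.List.length_pyRange_one]
  · intro i hA hB
    have hiN : i < n.toNat := by rw [funcLoopGt_length, pvArr_length] at hA; exact hA
    simp only [hsh] at h1 hA ⊢
    rw [← List.getD_eq_getElem _ 0 hA, List.getElem_map]
    rw [funcLoopGt_getD n.toNat (pvArr n) _ _ (le_of_lt h1) (le_of_eq (pvArr_length n).symm)
      (fun j hj => pvArr_getD n j hj) i]
    rw [PySem.List.getElem_pyRange_one, zero_add, pvArr_getD n i hiN, pyMod_two i]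
    rcases Nat.mod_two_eq_zero_or_one i with hp | hp
    · rw [if_neg (show ¬ ((i % 2 : Nat) : Int) = 1 by rw [hp]; norm_num)]
      rw [if_neg (by rintro ⟨-, h2, -⟩; omega)]
      unfold pvBase
      rw [if_pos hp]
    · rw [if_pos (show ((i % 2 : Nat) : Int) = 1 by rw [hp]; rfl)]
      have hcnd : (i < n.toNat ∧ i % 2 = 1 ∧
            2 * ((n.toNat / 2 : Nat) : Int) - 2 * (n / 2 - (n - k)) + 1 ≤ (i : Int))
          ↔ (2 * (n / 2 - min (n / 2 - (n - k)) (n / 2)) + 1 ≤ (i : Int)) := by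
        constructor
        · rintro ⟨-, -, h⟩; omega
        · intro h; exact ⟨hiN, hp, by omega⟩
      rw [if_congr hcnd rfl rfl]
      unfold pvBase
      rw [if_neg (show ¬ i % 2 = 0 by omega)]

-- the `neg = q` branch: the untouched array is B's base comprehension
lemma pvEqBranch (n : Int) :
    pvArr n = (PySem.List.pyRange 0 n 1).map (fun i =>
      if PySem.Int.mod i 2 ≠ 0 then -(i + 1) else i + 1) := by
  apply List.ext_getElem
  · rw [pvArr_length]; simp [PySem.List.length_pyRange_one]
  · intro i hA hB
    have hiN : i < n.toNat := by rw [pvArr_length] at hA; exact hA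
    rw [← List.getD_eq_getElem _ 0 hA, List.getElem_map, PySem.List.getElem_pyRange_one,
      zero_add, pvArr_getD n i hiN, pyMod_two i]
    rcases Nat.mod_two_eq_zero_or_one i with hp | hp <;>
      simp [pvBase, hp]

lemma func_eq (n k : Int) : func n k = func_alt n k := by
  simp only [func, func_alt]
  split_ifs with h1 h2
  · rw [show (PySem.List.pyRange 0 n 1).map
        (fun i => (i + 1) * (-1) ^ (PySem.Int.mod i 2).toNat) = pvArr n from rfl,
      pvLtBranch n k h1, List.map_map]
    rfl
  · rw [show (PySem.List.pyRange 0 n 1).map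
        (fun i => (i + 1) * (-1) ^ (PySem.Int.mod i 2).toNat) = pvArr n from rfl,
      pvGtBranch n k h2, List.map_map]
    rfl
  · rw [show (PySem.List.pyRange 0 n 1).map
        (fun i => (i + 1) * (-1) ^ (PySem.Int.mod i 2).toNat) = pvArr n from rfl,
      pvEqBranch n, List.map_map]
    rfl

-- ===== VERDICT (by name: the statement is the Claim_ definition above) =====
theorem func_spec : Claim_equal_func := by
  intro n k _
  unfold Spec_func
  exact func_eq n k
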